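-- pv_equiv track=rewrite | github.com/benjibaz31-maker/chart-analyser | performance_engine.py | mini_backtest
-- ===== SOURCE A (Python) =====
-- def mini_backtest(pair, action, score_h1, history, lookback=15):
--     """
--     Avant de passer un ordre, vérifie l'historique des signaux similaires.
--
--     Critères de similarité :
--       - Même paire
--       - Même direction (BUY/SELL)
--       - Score H1 dans un range de ±20 points
--       - Résultat connu (TP ou SL)
--
--     Retourne : (win_rate: int|None, nb_trades: int, reco: str)
--       reco = 'GO'        → win rate ≥ 60 % → tradings conseillé
--       reco = 'CAUTION'   → win rate 45-59 % → prudence, lot 50 %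
--       reco = 'SKIP'      → win rate < 45 % → passer son tour
--       reco = 'NO_DATA'   → moins de 3 trades similaires
--     """
--     pair_clean = pair.replace("/", "")
--     resolved   = [t for t in history
--                   if t.get("result") in ("TP", "SL")]
--
--     similar = [
--         t for t in resolved
--         if (t.get("pair","").replace("/","")) == pair_clean
--         and t.get("signal") == action
--         and abs(int(t.get("score_h1") or 0) - score_h1) <= 20
--     ][-lookback:]
--
--     nb = len(similar)
--     if nb < 3:
--         return None, nb, "NO_DATA"
--
--     tps = sum(1 for t in similar if t.get("result") == "TP")
--     wr  = round(tps / nb * 100)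
--
--     if   wr >= 60: reco = "GO"
--     elif wr >= 45: reco = "CAUTION"
--     else:          reco = "SKIP"
--
--     return wr, nb, reco
-- ===== SOURCE B (Python) =====
-- def _similar(t, pair_clean, action, score_h1):
--     return (t.get("result") in ("TP", "SL")
--             and t.get("pair", "").replace("/", "") == pair_clean
--             and t.get("signal") == action
--             and abs(int(t.get("score_h1") or 0) - score_h1) <= 20)
--
--
-- def mini_backtest(pair, action, score_h1, history, lookback=15):
--     """Single reverse scan with an early break once `lookback` similar trades
--     are collected, instead of two filter passes plus a slice."""
--     pair_clean = pair.replace("/", "")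
--     nb = 0
--     tps = 0
--     for t in reversed(history):
--         if _similar(t, pair_clean, action, score_h1):
--             nb += 1
--             if t.get("result") == "TP":
--                 tps += 1
--             if nb == lookback:
--                 break
--
--     if nb < 3:
--         return None, nb, "NO_DATA"
--
--     wr = round(tps / nb * 100)
--
--     if wr >= 60:
--         reco = "GO"
--     elif wr >= 45:
--         reco = "CAUTION"
--     else:
--         reco = "SKIP"
--
--     return wr, nb, reco
-- ===== Notes on version B (the rewrite author's own statement) =====
-- stated objective: alternative
-- what changed: Replaces the two list-comprehension filter passes plus a negative slice by a single reverse scan over history that tallies matches and TPs with an early break once lookback matches are collected.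
-- intended difference: For negative lookback when at least one similar resolved trade exists, A's slice similar[-lookback:] accidentally drops the -lookback oldest matches (at the witness A returns (None, 0, 'NO_DATA')), while B applies no cap and counts every match (B returns (None, 1, 'NO_DATA')); treating a non-positive lookback as 'no cap' is the intended reading, A's dropped-oldest stats are an artefact of the slice. — e.g. on mini_backtest("A", "BUY", 0, [[("result", "TP"), ("pair", "A"), ("signal", "BUY"), ("score_h1", "0")]], -1): A returns (none, 0, "NO_DATA"), B returns (none, 1, "NO_DATA")
import Mathlib
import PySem

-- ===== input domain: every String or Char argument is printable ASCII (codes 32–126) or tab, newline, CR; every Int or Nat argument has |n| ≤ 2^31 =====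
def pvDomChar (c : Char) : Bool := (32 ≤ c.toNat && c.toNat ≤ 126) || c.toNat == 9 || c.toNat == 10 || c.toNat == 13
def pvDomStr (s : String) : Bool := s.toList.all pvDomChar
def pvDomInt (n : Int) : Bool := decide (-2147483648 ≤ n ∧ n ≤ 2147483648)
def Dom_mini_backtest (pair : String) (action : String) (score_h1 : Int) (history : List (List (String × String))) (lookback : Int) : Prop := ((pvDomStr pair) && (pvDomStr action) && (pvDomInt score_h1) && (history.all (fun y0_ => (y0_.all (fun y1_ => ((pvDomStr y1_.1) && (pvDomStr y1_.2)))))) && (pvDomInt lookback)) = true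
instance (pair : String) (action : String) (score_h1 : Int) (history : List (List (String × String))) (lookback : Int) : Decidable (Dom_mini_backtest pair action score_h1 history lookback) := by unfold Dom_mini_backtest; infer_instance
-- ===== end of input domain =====

-- B replaces A's two filter passes + negative slice by one reverse scan with an early break
-- after `lookback` matches (an 'alternative' decomposition; return value only, no mutation involved).

-- Shared leaf helpers (both Pythons contain these very expressions).

-- round-half-even of a/b (b > 0): Python's round() tie rule on an exact rational.
def pvRHE (a b : Nat) : Nat :=
  let q := a / b
  let r := a % b
  if 2 * r < b then q else if b < 2 * r then q + 1 else if q % 2 = 0 then q else q + 1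

-- round(tps / nb * 100): exact integer model of CPython's float evaluation
-- (IEEE-754 double: 53-bit round-to-nearest-even at the division, at the product, then round()),
-- valid for 0 ≤ tps ≤ nb, 0 < nb (the only values reached here).
def pvRound100Div (tps nb : Int) : Int :=
  let a := tps.toNat
  let b := nb.toNat
  if a = 0 then 0
  else
    let t := 53 + (Nat.log2 b + 1)
    let q := (a * 2 ^ t) / b
    let s := (Nat.log2 q + 1) - 53
    let m := pvRHE (a * 2 ^ t) (b * 2 ^ s)
    let hm := 100 * m
    let s2 := (Nat.log2 hm + 1) - 53
    let M := if s2 = 0 then hm else pvRHE hm (2 ^ s2)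
    let E : Int := (s2 : Int) + (s : Int) - (t : Int)
    if 0 ≤ E then (M : Int) * 2 ^ E.toNat else (pvRHE M (2 ^ (-E).toNat) : Int)

-- t.get("result") in ("TP", "SL")
def pvResolved (t : List (String × String)) : Bool :=
  (PySem.Dict.mk t).get? "result" == some "TP" || (PySem.Dict.mk t).get? "result" == some "SL"

-- int(t.get("score_h1") or 0); an unparseable truthy string is a ValueError, excluded by Pre_ (getD 0 there)
def pvScoreVal (t : List (String × String)) : Int :=
  match (PySem.Dict.mk t).get? "score_h1" with
  | none => 0
  | some s => if s == "" then 0 else (PySem.Int.ofStr? s).getD 0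

-- the full similarity test of Source B's _similar
def pvSimilar (pair_clean action : String) (score_h1 : Int) (t : List (String × String)) : Bool :=
  pvResolved t
  && (PySem.Str.replace ((PySem.Dict.mk t).getD "pair" "") "/" "" == pair_clean)
  && ((PySem.Dict.mk t).get? "signal" == some action)
  && decide (|pvScoreVal t - score_h1| ≤ 20)

-- ===== PORT A =====
def mini_backtest (pair : String) (action : String) (score_h1 : Int) (history : List (List (String × String))) (lookback : Int) : Option Int × Int × String :=
  let pair_clean := PySem.Str.replace pair "/" ""
  let resolved := history.filter pvResolved
  let similar := PySem.List.slice
    (resolved.filter (fun t =>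
      (PySem.Str.replace ((PySem.Dict.mk t).getD "pair" "") "/" "" == pair_clean)
      && ((PySem.Dict.mk t).get? "signal" == some action)
      && decide (|pvScoreVal t - score_h1| ≤ 20)))
    (some (-lookback)) none
  let nb : Int := similar.length
  if nb < 3 then (none, nb, "NO_DATA")
  else
    let tps : Int := similar.countP (fun t => (PySem.Dict.mk t).get? "result" == some "TP")
    let wr := pvRound100Div tps nb
    let reco := if 60 ≤ wr then "GO" else if 45 ≤ wr then "CAUTION" else "SKIP"
    (some wr, nb, reco)

-- ===== PORT B =====
-- the for-loop over reversed(history) with its early break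
def pvScanB (pair_clean action : String) (score_h1 lookback : Int) :
    List (List (String × String)) → Int → Int → Int × Int
  | [], nb, tps => (nb, tps)
  | t :: rest, nb, tps =>
    if pvSimilar pair_clean action score_h1 t then
      let nb' := nb + 1
      let tps' := if (PySem.Dict.mk t).get? "result" == some "TP" then tps + 1 else tps
      if nb' == lookback then (nb', tps')
      else pvScanB pair_clean action score_h1 lookback rest nb' tps'
    else pvScanB pair_clean action score_h1 lookback rest nb tps

def mini_backtest_alt (pair : String) (action : String) (score_h1 : Int) (history : List (List (String × String))) (lookback : Int) : Option Int × Int × String :=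
  let pair_clean := PySem.Str.replace pair "/" ""
  let p := pvScanB pair_clean action score_h1 lookback history.reverse 0 0
  let nb := p.1
  let tps := p.2
  if nb < 3 then (none, nb, "NO_DATA")
  else
    let wr := pvRound100Div tps nb
    let reco := if 60 ≤ wr then "GO" else if 45 ≤ wr then "CAUTION" else "SKIP"
    (some wr, nb, reco)

-- ===== PRECONDITION & SPEC =====
-- does int(t.get("score_h1") or 0) return? (missing, empty, or parseable)
def pvScoreOk (t : List (String × String)) : Bool :=
  match (PySem.Dict.mk t).get? "score_h1" with
  | none => true
  | some s => s == "" || (PySem.Int.ofStr? s).isSome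

-- Pre_ excludes exactly the inputs where Python A raises ValueError: a resolved trade matching
-- pair and signal whose "score_h1" value is a truthy string int() cannot parse.
def Pre_mini_backtest (pair : String) (action : String) (score_h1 : Int) (history : List (List (String × String))) (lookback : Int) : Prop :=
  ∀ t ∈ history,
    (pvResolved t
      && (PySem.Str.replace ((PySem.Dict.mk t).getD "pair" "") "/" "" == PySem.Str.replace pair "/" "")
      && ((PySem.Dict.mk t).get? "signal" == some action)) = true →
    pvScoreOk t = true

instance (pair : String) (action : String) (score_h1 : Int) (history : List (List (String × String))) (lookback : Int) : Decidable (Pre_mini_backtest pair action score_h1 history lookback) := by unfold Pre_mini_backtest; infer_instance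

def pvWitness_mini_backtest : String × String × Int × (List (List (String × String))) × Int :=
  ("EUR/USD", "BUY", 50, [[("result", "TP"), ("pair", "EURUSD"), ("signal", "BUY"), ("score_h1", "55")]], 15)

-- For negative lookback with at least one similar resolved trade, A's slice similar[-lookback:]
-- accidentally drops the -lookback oldest matches, while B applies no cap and counts every match;
-- treating a non-positive lookback as "no cap" is the intended reading of the parameter.
def D_mini_backtest (pair : String) (action : String) (score_h1 : Int) (history : List (List (String × String))) (lookback : Int) : Prop :=
  lookback < 0 ∧ ∃ t ∈ history,
    (PySem.Dict.mk t).get? "result" ∈ [some "TP", some "SL"]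
    ∧ PySem.Str.replace (((PySem.Dict.mk t).get? "pair").getD "") "/" "" = PySem.Str.replace pair "/" ""
    ∧ (PySem.Dict.mk t).get? "signal" = some action
    ∧ score_h1 - 20 ≤ pvScoreVal t ∧ pvScoreVal t ≤ score_h1 + 20

instance (pair : String) (action : String) (score_h1 : Int) (history : List (List (String × String))) (lookback : Int) : Decidable (D_mini_backtest pair action score_h1 history lookback) := by unfold D_mini_backtest; infer_instance

def Spec_mini_backtest (pair : String) (action : String) (score_h1 : Int) (history : List (List (String × String))) (lookback : Int) (out : Option Int × Int × String) : Prop :=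
  ¬ D_mini_backtest pair action score_h1 history lookback → out = mini_backtest_alt pair action score_h1 history lookback

instance (pair : String) (action : String) (score_h1 : Int) (history : List (List (String × String))) (lookback : Int) (out : Option Int × Int × String) : Decidable (Spec_mini_backtest pair action score_h1 history lookback out) := by unfold Spec_mini_backtest; infer_instance

def pvDiffWitness_mini_backtest : String × String × Int × (List (List (String × String))) × Int :=
  ("A", "BUY", 0, [[("result", "TP"), ("pair", "A"), ("signal", "BUY"), ("score_h1", "0")]], -1)

def pvDiffWitnessOut_mini_backtest : (Option Int × Int × String) × (Option Int × Int × String) :=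
  ((none, 0, "NO_DATA"), (none, 1, "NO_DATA"))

-- ===== CLAIM (what is proved, stated in full; the proofs are below) =====
def Claim_unchanged_mini_backtest : Prop := ∀ (pair : String) (action : String) (score_h1 : Int) (history : List (List (String × String))) (lookback : Int), Dom_mini_backtest pair action score_h1 history lookback → Pre_mini_backtest pair action score_h1 history lookback → Spec_mini_backtest pair action score_h1 history lookback (mini_backtest pair action score_h1 history lookback)

def Claim_changed_mini_backtest : Prop := Dom_mini_backtest (pvDiffWitness_mini_backtest.1) (pvDiffWitness_mini_backtest.2.1) (pvDiffWitness_mini_backtest.2.2.1) (pvDiffWitness_mini_backtest.2.2.2.1) (pvDiffWitness_mini_backtest.2.2.2.2) ∧ Pre_mini_backtest (pvDiffWitness_mini_backtest.1) (pvDiffWitness_mini_backtest.2.1) (pvDiffWitness_mini_backtest.2.2.1) (pvDiffWitness_mini_backtest.2.2.2.1) (pvDiffWitness_mini_backtest.2.2.2.2) ∧ D_mini_backtest (pvDiffWitness_mini_backtest.1) (pvDiffWitness_mini_backtest.2.1) (pvDiffWitness_mini_backtest.2.2.1) (pvDiffWitness_mini_backtest.2.2.2.1) (pvDiffWitness_mini_backtest.2.2.2.2)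 ∧ mini_backtest (pvDiffWitness_mini_backtest.1) (pvDiffWitness_mini_backtest.2.1) (pvDiffWitness_mini_backtest.2.2.1) (pvDiffWitness_mini_backtest.2.2.2.1) (pvDiffWitness_mini_backtest.2.2.2.2) = pvDiffWitnessOut_mini_backtest.1 ∧ mini_backtest_alt (pvDiffWitness_mini_backtest.1) (pvDiffWitness_mini_backtest.2.1) (pvDiffWitness_mini_backtest.2.2.1) (pvDiffWitness_mini_backtest.2.2.2.1) (pvDiffWitness_mini_backtest.2.2.2.2) = pvDiffWitnessOut_mini_backtest.2 ∧ pvDiffWitnessOut_mini_backtest.1 ≠ pvDiffWitnessOut_mini_backtest.2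

def Claim_exact_mini_backtest : Prop := ∀ (pair : String) (action : String) (score_h1 : Int) (history : List (List (String × String))) (lookback : Int), Dom_mini_backtest pair action score_h1 history lookback → Pre_mini_backtest pair action score_h1 history lookback → D_mini_backtest pair action score_h1 history lookback → mini_backtest pair action score_h1 history lookback ≠ mini_backtest_alt pair action score_h1 history lookback

-- ===== LEMMAS AND PROOFS =====

-- t.get("result") == "TP"
def pvTP (t : List (String × String)) : Bool :=
  (PySem.Dict.mk t).get? "result" == some "TP"

theorem pvTP_def : (fun t => (PySem.Dict.mk t).get? "result" == some "TP") = pvTP := rfl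

-- the docstring criterion in D_ is exactly Source B's similarity test
theorem pvSimilar_iff (pc action : String) (sh : Int) (t : List (String × String)) :
    pvSimilar pc action sh t = true ↔
      ((PySem.Dict.mk t).get? "result" ∈ [some "TP", some "SL"]
        ∧ PySem.Str.replace (((PySem.Dict.mk t).get? "pair").getD "") "/" "" = pc
        ∧ (PySem.Dict.mk t).get? "signal" = some action
        ∧ sh - 20 ≤ pvScoreVal t ∧ pvScoreVal t ≤ sh + 20) := by
  simp only [pvSimilar, pvResolved, Bool.and_eq_true, Bool.or_eq_true, beq_iff_eq,
    decide_eq_true_eq, List.mem_cons, List.not_mem_nil, or_false,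
    PySem.Dict.getD_eq_get?_getD, abs_le]
  constructor
  · rintro ⟨⟨⟨h1, h2⟩, h3⟩, h4⟩
    exact ⟨h1, h2, h3, by omega, by omega⟩
  · rintro ⟨h1, h2, h3, h4, h5⟩
    exact ⟨⟨⟨h1, h2⟩, h3⟩, by omega⟩

-- the common tail of both ports, as a function of the tallies
def pvOut (nb tps : Int) : Option Int × Int × String :=
  if nb < 3 then (none, nb, "NO_DATA")
  else
    let wr := pvRound100Div tps nb
    (some wr, nb, if 60 ≤ wr then "GO" else if 45 ≤ wr then "CAUTION" else "SKIP")

theorem pvOut_snd (nb tps : Int) : (pvOut nb tps).2.1 = nb := by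
  unfold pvOut; split <;> rfl

-- A's two-stage filter is one filter by the full similarity predicate
theorem pv_filter_eq (pc action : String) (sh : Int) (history : List (List (String × String))) :
    (history.filter pvResolved).filter
      (fun t => (PySem.Str.replace ((PySem.Dict.mk t).getD "pair" "") "/" "" == pc)
        && ((PySem.Dict.mk t).get? "signal" == some action)
        && decide (|pvScoreVal t - sh| ≤ 20))
    = history.filter (pvSimilar pc action sh) := by
  rw [List.filter_filter]
  apply List.filter_congr
  intro t _
  simp only [pvSimilar]
  cases pvResolved t <;> simp

theorem pv_out_A (pair action : String) (sh : Int)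
    (history : List (List (String × String))) (lb : Int) :
    mini_backtest pair action sh history lb =
      pvOut
        ((PySem.List.slice (history.filter (pvSimilar (PySem.Str.replace pair "/" "") action sh)) (some (-lb)) none).length : Int)
        ((PySem.List.slice (history.filter (pvSimilar (PySem.Str.replace pair "/" "") action sh)) (some (-lb)) none).countP pvTP : Int) := by
  simp only [mini_backtest, pvOut, pv_filter_eq, pvTP_def]

theorem pv_out_B (pair action : String) (sh : Int)
    (history : List (List (String × String))) (lb : Int) :
    mini_backtest_alt pair action sh history lb =
      pvOut (pvScanB (PySem.Str.replace pair "/" "") action sh lb history.reverse 0 0).1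
            (pvScanB (PySem.Str.replace pair "/" "") action sh lb history.reverse 0 0).2 := by
  simp only [mini_backtest_alt, pvOut]

-- scan never breaks once lookback ≤ nb (in particular for lookback ≤ 0): it tallies every match
theorem pv_scan_ge (pc action : String) (sh lb : Int)
    (l : List (List (String × String))) (nb tps : Int) (h : lb ≤ nb) :
    pvScanB pc action sh lb l nb tps =
      (nb + ((l.filter (pvSimilar pc action sh)).length : Int),
       tps + ((l.filter (pvSimilar pc action sh)).countP pvTP : Int)) := by
  induction l generalizing nb tps with
  | nil => simp [pvScanB]
  | cons t rest ih =>
    by_cases hs : pvSimilar pc action sh t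
    · rw [pvScanB, if_pos hs]
      have hne : ¬((nb + 1 : Int) == lb) = true := by simp; omega
      rw [if_neg hne, ih (nb + 1) _ (by omega), List.filter_cons_of_pos hs]
      rw [Prod.mk.injEq]
      constructor
      · rw [List.length_cons]; push_cast; ring
      · by_cases htp : pvTP t
        · have htp' : ((PySem.Dict.mk t).get? "result" == some "TP") = true := htp
          rw [if_pos htp', List.countP_cons, if_pos htp]
          push_cast; ring
        · have htp' : ¬((PySem.Dict.mk t).get? "result" == some "TP") = true := htp
          rw [if_neg htp', List.countP_cons, if_neg htp]
          push_cast; ring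
    · rw [pvScanB, if_neg hs, ih nb tps h, List.filter_cons_of_neg hs]

-- scan with nb < lookback tallies the first (lookback - nb) matches, then breaks
theorem pv_scan_lt (pc action : String) (sh lb : Int)
    (l : List (List (String × String))) (nb tps : Int) (h : nb < lb) :
    pvScanB pc action sh lb l nb tps =
      (nb + (((l.filter (pvSimilar pc action sh)).take (lb - nb).toNat).length : Int),
       tps + (((l.filter (pvSimilar pc action sh)).take (lb - nb).toNat).countP pvTP : Int)) := by
  induction l generalizing nb tps with
  | nil => simp [pvScanB]
  | cons t rest ih =>
    by_cases hs : pvSimilar pc action sh t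
    · rw [pvScanB, if_pos hs, List.filter_cons_of_pos hs]
      have hsplit : (lb - nb).toNat = (lb - (nb + 1)).toNat + 1 := by omega
      rw [hsplit, List.take_succ_cons]
      by_cases hbr : (nb + 1 : Int) = lb
      · have hbr' : ((nb + 1 : Int) == lb) = true := by simpa using hbr
        rw [if_pos hbr']
        have h1 : (lb - (nb + 1)).toNat = 0 := by omega
        rw [h1, List.take_zero, Prod.mk.injEq]
        constructor
        · simp
        · by_cases htp : pvTP t
          · have htp' : ((PySem.Dict.mk t).get? "result" == some "TP") = true := htp
            rw [if_pos htp', List.countP_cons, if_pos htp]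
            simp
          · have htp' : ¬((PySem.Dict.mk t).get? "result" == some "TP") = true := htp
            rw [if_neg htp', List.countP_cons, if_neg htp]
            simp
      · have hbr' : ¬((nb + 1 : Int) == lb) = true := by simpa using hbr
        rw [if_neg hbr', ih (nb + 1) _ (by omega), Prod.mk.injEq]
        constructor
        · rw [List.length_cons]; push_cast; ring
        · by_cases htp : pvTP t
          · have htp' : ((PySem.Dict.mk t).get? "result" == some "TP") = true := htp
            rw [if_pos htp', List.countP_cons, if_pos htp]
            push_cast; ring
          · have htp' : ¬((PySem.Dict.mk t).get? "result" == some "TP") = true := htp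
            rw [if_neg htp', List.countP_cons, if_neg htp]
            push_cast; ring
    · rw [pvScanB, if_neg hs, ih nb tps h, List.filter_cons_of_neg hs]

-- ===== VERDICT (by name: the statement is the Claim_ definition above) =====
theorem mini_backtest_spec : Claim_unchanged_mini_backtest := by
  intro pair action sh history lb _dom _pre hnd
  rw [pv_out_A, pv_out_B]
  rcases lt_trichotomy lb 0 with hneg | hzero | hpos
  · -- lookback < 0: outside D_ there is no similar trade at all
    have hfil : history.filter (pvSimilar (PySem.Str.replace pair "/" "") action sh) = [] := by
      rw [List.filter_eq_nil_iff]
      intro t ht hsim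
      exact hnd ⟨hneg, t, ht, (pvSimilar_iff _ _ _ _).mp hsim⟩
    have hrev : history.reverse.filter (pvSimilar (PySem.Str.replace pair "/" "") action sh) = [] := by
      rw [List.filter_reverse, hfil, List.reverse_nil]
    rw [pv_scan_ge _ _ _ _ _ 0 0 (by omega), hrev, hfil]
    have hsl : PySem.List.slice ([] : List (List (String × String))) (some (-lb)) none = [] := by
      rw [PySem.List.slice_from _ (by omega : (0:Int) ≤ -lb)]
      exact List.drop_nil
    rw [hsl]
    norm_num
  · -- lookback = 0: the slice keeps everything and the scan never breaks
    subst hzero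
    rw [pv_scan_ge _ _ _ _ _ 0 0 (by omega), neg_zero,
      PySem.List.slice_zero_start, PySem.List.slice_none_none,
      List.filter_reverse, List.length_reverse, List.countP_reverse]
    norm_num
  · -- 0 < lookback: last-k slice = reversed take-k of the reversed matches
    rw [pv_scan_lt _ _ _ _ _ 0 0 (by omega)]
    have hlbk : lb = (lb.toNat : Int) := by omega
    have hsub : (lb - 0).toNat = lb.toNat := by omega
    rw [hsub, List.filter_reverse, List.take_reverse, List.length_reverse, List.countP_reverse]
    rw [hlbk, PySem.List.slice_from_neg_natCast _ lb.toNat (by omega)]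
    norm_num
    have hmax : (max lb 0).toNat = lb.toNat := by omega
    rw [hmax]

theorem mini_backtest_changed : Claim_changed_mini_backtest := by
  unfold Claim_changed_mini_backtest; decide

theorem mini_backtest_tight : Claim_exact_mini_backtest := by
  intro pair action sh history lb _dom _pre hd
  obtain ⟨hneg, t, ht, hP⟩ := hd
  have hmem : t ∈ history.filter (pvSimilar (PySem.Str.replace pair "/" "") action sh) :=
    List.mem_filter.mpr ⟨ht, (pvSimilar_iff _ _ _ _).mpr hP⟩
  have hlen : 0 < (history.filter (pvSimilar (PySem.Str.replace pair "/" "") action sh)).length :=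
    List.length_pos_of_mem hmem
  intro heq
  have h2 := congrArg (fun o : Option Int × Int × String => o.2.1) heq
  rw [pv_out_A, pv_out_B, pv_scan_ge _ _ _ _ _ 0 0 (by omega)] at h2
  simp only [pvOut_snd] at h2
  rw [PySem.List.slice_from _ (by omega : (0:Int) ≤ -lb), List.filter_reverse,
    List.length_reverse, List.length_drop] at h2
  have hj : 0 < (-lb).toNat := by omega
  omega
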